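-- pv_equiv track=rewrite | github.com/mathew-felix/neural-edge-video-compression | run_decompression.py | _normalize_anchor_positions
-- ===== SOURCE A (Python) =====
-- from typing import Any, Dict, List, Optional, Sequence, Tuple
--
-- def _normalize_anchor_positions(indices: Sequence[int], frame_count: int) -> Tuple[List[int], List[int]]:
--     n = min(len(indices), int(frame_count))
--     if n <= 0:
--         return [], []
--     lookup: Dict[int, int] = {}
--     for pos in range(n):
--         lookup[int(indices[pos])] = int(pos)
--     keys = sorted(lookup.keys())
--     return keys, [lookup[k] for k in keys]
-- ===== SOURCE B (Python) =====
-- def _normalize_anchor_positions(indices, frame_count):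
--     n = min(len(indices), int(frame_count))
--     if n <= 0:
--         return [], []
--     vals = [int(indices[pos]) for pos in range(n)]
--     seen = set()
--     items = []
--     for pos in reversed(range(n)):
--         v = vals[pos]
--         if v not in seen:
--             seen.add(v)
--             items.append((v, pos))
--     items.sort(key=lambda t: t[0])
--     return [v for v, _ in items], [p for _, p in items]
-- ===== Notes on version B (the rewrite author's own statement) =====
-- stated objective: alternative
-- what changed: Replaces the value-to-position dict (last write wins) plus key sort plus per-key lookups with a single backward scan that collects each value's last occurrence as (value, position) pairs guarded by a seen-set, then one sort of the pairs by value.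
import Mathlib
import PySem

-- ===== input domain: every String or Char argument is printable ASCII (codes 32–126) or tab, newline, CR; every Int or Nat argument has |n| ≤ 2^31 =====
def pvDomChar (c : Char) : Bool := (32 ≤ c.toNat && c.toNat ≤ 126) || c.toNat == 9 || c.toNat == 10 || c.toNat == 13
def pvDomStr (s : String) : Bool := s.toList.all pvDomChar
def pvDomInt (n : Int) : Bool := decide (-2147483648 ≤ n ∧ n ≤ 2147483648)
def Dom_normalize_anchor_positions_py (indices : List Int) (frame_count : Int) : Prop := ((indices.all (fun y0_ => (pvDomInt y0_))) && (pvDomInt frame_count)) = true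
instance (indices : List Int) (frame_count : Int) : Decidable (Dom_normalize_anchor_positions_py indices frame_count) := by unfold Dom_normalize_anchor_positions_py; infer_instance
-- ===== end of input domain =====

-- B replaces A's value→position dict with pure list operations (sorted set of values,
-- last-occurrence via a reversed-list index scan); alternative decomposition, not faster.


-- ===== PORT A =====
def normalize_anchor_positions_py (indices : List Int) (frame_count : Int) : List Int × List Int :=
  let n : Int := min (indices.length : Int) frame_count
  if n ≤ 0 then ([], [])
  else
    let lookup : PySem.Dict Int Int :=
      (PySem.List.pyRange 0 n).foldl
        (fun d pos => d.insert (PySem.List.pyGetD indices pos 0) pos) ⟨[]⟩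
    let keys := PySem.List.sorted lookup.keys (fun k => k)
    (keys, keys.map (fun k => lookup.getD k 0))

-- ===== PORT B =====
def normalize_anchor_positions_py_alt (indices : List Int) (frame_count : Int) : List Int × List Int :=
  let n : Int := min (indices.length : Int) frame_count
  if n ≤ 0 then ([], [])
  else
    let vals := (PySem.List.pyRange 0 n).map (fun pos => PySem.List.pyGetD indices pos 0)
    let scan := (PySem.List.pyRange 0 n).reverse.foldl
      (fun (s : PySem.Set Int × List (Int × Int)) pos =>
        let v := PySem.List.pyGetD vals pos 0
        if s.1.contains v then s else (s.1.add v, s.2 ++ [(v, pos)]))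
      (PySem.Set.empty, [])
    let items := PySem.List.sorted scan.2 (fun t => t.1)
    (items.map (fun t => t.1), items.map (fun t => t.2))

-- ===== PRECONDITION & SPEC =====
def Spec_normalize_anchor_positions_py (indices : List Int) (frame_count : Int) (out : List Int × List Int) : Prop := out = normalize_anchor_positions_py_alt indices frame_count
instance (indices : List Int) (frame_count : Int) (out : List Int × List Int) : Decidable (Spec_normalize_anchor_positions_py indices frame_count out) := by unfold Spec_normalize_anchor_positions_py; infer_instance

-- ===== CLAIM (what is proved, stated in full; the proofs are below) =====
def Claim_equal_normalize_anchor_positions_py : Prop := ∀ (indices : List Int) (frame_count : Int), Dom_normalize_anchor_positions_py indices frame_count → Spec_normalize_anchor_positions_py indices frame_count (normalize_anchor_positions_py indices frame_count)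

-- ===== LEMMAS AND PROOFS =====

/-- The first `m` values A's loop reads (with a harmless default for out-of-range). -/
def pvVals (indices : List Int) (m : Nat) : List Int :=
  (List.range m).map (fun i => indices.getD i 0)

/-- Position of the last occurrence of `k` among the first `m` values. -/
def pvLast (indices : List Int) (m : Nat) (k : Int) : Nat :=
  m - 1 - (pvVals indices m).reverse.idxOf k

/-- A's dict after the loop over positions `0 … m-1`. -/
def pvDict (indices : List Int) (m : Nat) : PySem.Dict Int Int :=
  (List.range m).foldl (fun d i => d.insert (indices.getD i 0) (i : Int)) ⟨[]⟩

lemma pvVals_succ (indices : List Int) (m : Nat) :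
    pvVals indices (m + 1) = pvVals indices m ++ [indices.getD m 0] := by
  simp [pvVals, List.range_succ]

lemma pvLast_succ_self (indices : List Int) (m : Nat) :
    pvLast indices (m + 1) (indices.getD m 0) = m := by
  simp [pvLast, pvVals_succ]

lemma pvLast_succ_of_ne (indices : List Int) (m : Nat) {k : Int}
    (h : k ≠ indices.getD m 0) :
    pvLast indices (m + 1) k = pvLast indices m k := by
  have hb : (indices.getD m 0 == k) = false := by simpa using (Ne.symm h)
  simp only [pvLast, pvVals_succ, List.reverse_append, List.reverse_cons, List.reverse_nil,
    List.nil_append, List.cons_append, List.idxOf_cons, hb, cond_false]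
  omega

lemma pvIdxOf?_of_mem {l : List Int} {k : Int} (h : k ∈ l) :
    l.idxOf? k = some (l.idxOf k) := by
  induction l with
  | nil => simp at h
  | cons a t ih =>
    by_cases hk : k = a
    · subst hk; simp [List.idxOf?_cons, List.idxOf_cons_self]
    · simp only [List.mem_cons] at h
      simp [List.idxOf?_cons, Ne.symm hk, ih (h.resolve_left hk)]

lemma pvFind?_beq_of_mem {l : List Int} {k : Int} (h : k ∈ l) :
    l.find? (fun k' => k' == k) = some k := by
  induction l with
  | nil => simp at h
  | cons a t ih =>
    by_cases hk : a = k
    · subst hk; simp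
    · simp only [List.mem_cons] at h
      simp [hk, ih (h.resolve_left (fun e => hk e.symm))]

lemma pvDict_items (indices : List Int) (m : Nat) :
    (pvDict indices m).items
      = (PySem.Set.ofList (pvVals indices m)).map
          (fun k => (k, (pvLast indices m k : Int))) := by
  induction m with
  | zero => simp [pvDict, pvVals, PySem.Set.ofList, PySem.Set.empty]
  | succ m ih =>
    have hfold : pvDict indices (m + 1)
        = (pvDict indices m).insert (indices.getD m 0) (m : Int) := by
      simp [pvDict, List.range_succ]
    have hset : PySem.Set.ofList (pvVals indices (m + 1))
        = PySem.Set.add (PySem.Set.ofList (pvVals indices m)) (indices.getD m 0) := by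
      simp [pvVals_succ, PySem.Set.ofList]
    set x := indices.getD m 0 with hx
    by_cases hmem : x ∈ PySem.Set.ofList (pvVals indices m)
    · -- value already present: dict overwrites in place, set unchanged
      have hcont : (pvDict indices m).contains x = true := by
        simp only [PySem.Dict.contains, ih, List.any_map]
        simp only [List.any_eq_true, Function.comp]
        exact ⟨x, hmem, by simp⟩
      have hsetc : (PySem.Set.ofList (pvVals indices m) : List Int).contains x = true := by
        simpa using hmem
      rw [hfold, hset, PySem.Dict.insert, if_pos hcont, PySem.Set.add, if_pos hsetc]
      simp only [ih, List.map_map]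
      refine List.map_congr_left (fun k hk => ?_)
      by_cases hkx : k = x
      · subst hkx
        have hself := pvLast_succ_self indices m
        simp only [List.getD_eq_getElem?_getD] at hself
        simp [hx, hself]
      · simp [Function.comp, hkx, pvLast_succ_of_ne indices m (hx ▸ hkx)]
    · -- new value: dict and set both append
      have hcont : (pvDict indices m).contains x = false := by
        simp only [PySem.Dict.contains, ih, List.any_map]
        simp only [List.any_eq_false, Function.comp]
        intro k hk
        simp only [beq_iff_eq]
        exact fun e => hmem (e ▸ hk)
      have hsetc : (PySem.Set.ofList (pvVals indices m) : List Int).contains x = false := by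
        simpa using hmem
      rw [hfold, hset, PySem.Dict.insert, hcont, if_neg (by simp), PySem.Set.add, hsetc,
        if_neg (by simp)]
      simp only [ih, List.map_append, List.map_cons, List.map_nil]
      congr 1
      · refine List.map_congr_left (fun k hk => ?_)
        have hkx : k ≠ x := fun e => hmem (e ▸ hk)
        simp [pvLast_succ_of_ne indices m (hx ▸ hkx)]
      · have hself := pvLast_succ_self indices m
        simp only [List.getD_eq_getElem?_getD] at hself
        simp [hx, hself]

lemma pvDict_keys (indices : List Int) (m : Nat) :
    (pvDict indices m).keys = PySem.Set.ofList (pvVals indices m) := by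
  unfold PySem.Dict.keys
  rw [pvDict_items, List.map_map]
  exact (List.map_congr_left fun k _ => rfl).trans (List.map_id _)

lemma pvDict_getD (indices : List Int) (m : Nat) {k : Int}
    (h : k ∈ PySem.Set.ofList (pvVals indices m)) :
    (pvDict indices m).getD k 0 = (pvLast indices m k : Int) := by
  simp only [PySem.Dict.getD, PySem.Dict.get?, pvDict_items, List.find?_map]
  have : ((PySem.Set.ofList (pvVals indices m) : List Int).find?
      ((fun p => p.1 == k) ∘ fun k' => (k', (pvLast indices m k' : Int))))
      = some k := by
    simpa [Function.comp] using pvFind?_beq_of_mem h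
  simp [this]

lemma pvVals_length (indices : List Int) (m : Nat) : (pvVals indices m).length = m := by
  simp [pvVals]

lemma pvVals_getElem (indices : List Int) (m : Nat) (i : Nat) (h : i < m) :
    (pvVals indices m)[i]'(by simpa [pvVals_length] using h) = indices.getD i 0 := by
  simp [pvVals]

lemma pvScan_take (indices : List Int) (m : Nat) :
    ∀ j, j ≤ m →
    ((List.range m).reverse.take j).foldl
      (fun (s : PySem.Set Int × List (Int × Int)) (p : Nat) =>
        let v := (pvVals indices m).getD p 0
        if s.1.contains v then s else (s.1.add v, s.2 ++ [(v, (p : Int))]))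
      (PySem.Set.empty, [])
    = (PySem.Set.ofList (((pvVals indices m).reverse).take j),
       (PySem.Set.ofList (((pvVals indices m).reverse).take j)).map
         (fun k => (k, (pvLast indices m k : Int)))) := by
  intro j hj
  induction j with
  | zero => simp [PySem.Set.ofList, PySem.Set.empty]
  | succ j ih =>
    have hjm : j < m := by omega
    have hrl : ((List.range m).reverse).length = m := by simp
    have hvl : ((pvVals indices m).reverse).length = m := by simp [pvVals_length]
    have hrget : ((List.range m).reverse)[j]'(by omega) = m - 1 - j := by
      simp [List.getElem_reverse]
    have hvget : ((pvVals indices m).reverse)[j]'(by omega) = indices.getD (m - 1 - j) 0 := by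
      rw [List.getElem_reverse]
      have : (pvVals indices m).length - 1 - j = m - 1 - j := by simp [pvVals_length]
      simp only [this]
      exact pvVals_getElem indices m _ (by omega)
    have htake1 : ((List.range m).reverse).take (j + 1)
        = ((List.range m).reverse).take j ++ [m - 1 - j] := by
      rw [List.take_add_one, List.getElem?_eq_getElem (by omega), hrget]
      rfl
    have htake2 : ((pvVals indices m).reverse).take (j + 1)
        = ((pvVals indices m).reverse).take j ++ [indices.getD (m - 1 - j) 0] := by
      rw [List.take_add_one, List.getElem?_eq_getElem (by omega), hvget]
      rfl
    set w : Int := indices.getD (m - 1 - j) 0 with hw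
    have hvstep : (pvVals indices m).getD (m - 1 - j) 0 = w := by
      rw [List.getD_eq_getElem _ _ (by simpa [pvVals_length] using (by omega : m - 1 - j < m))]
      rw [pvVals_getElem indices m _ (by omega)]
    have hofl : PySem.Set.ofList (((pvVals indices m).reverse).take (j + 1))
        = (PySem.Set.ofList (((pvVals indices m).reverse).take j)).add w := by
      rw [htake2, PySem.Set.ofList, PySem.Set.ofList, List.foldl_append]
      rfl
    rw [htake1, List.foldl_append, ih (by omega)]
    simp only [List.foldl_cons, List.foldl_nil, hvstep]
    by_cases hmem : w ∈ PySem.Set.ofList (((pvVals indices m).reverse).take j)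
    · have hcont : (PySem.Set.ofList (((pvVals indices m).reverse).take j) : List Int).contains w
          = true := by simpa using hmem
      have hadd : (PySem.Set.ofList (((pvVals indices m).reverse).take j)).add w
          = PySem.Set.ofList (((pvVals indices m).reverse).take j) := by
        rw [PySem.Set.add, if_pos hcont]
      rw [hofl, hadd]
      simp only [hcont, if_true]
    · have hcont : (PySem.Set.ofList (((pvVals indices m).reverse).take j) : List Int).contains w
          = false := by simpa using hmem
      have hidx : List.idxOf w ((pvVals indices m).reverse) = j := by
        have hmemrev : w ∈ (pvVals indices m).reverse := by
          rw [← hvget]; exact List.getElem_mem _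
        have h1 := pvIdxOf?_of_mem hmemrev
        have h2 : ((pvVals indices m).reverse).idxOf? w = some j := by
          rw [List.idxOf?_eq_some_iff]
          refine ⟨by omega, hvget, ?_⟩
          intro i hij hgi
          apply hmem
          rw [PySem.Set.mem_ofList]
          have him : i < (((pvVals indices m).reverse).take j).length := by
            simp [hvl]; omega
          have : (((pvVals indices m).reverse).take j)[i]'him = w := by
            simpa using hgi
          rw [← this]
          exact List.getElem_mem _
        rw [h1] at h2
        exact Option.some_injective _ h2
      have hlast : pvLast indices m w = m - 1 - j := by
        rw [pvLast, hidx]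
      rw [hofl, PySem.Set.add, hcont]
      simp [hlast]

-- ===== VERDICT (by name: the statement is the Claim_ definition above) =====
theorem normalize_anchor_positions_py_spec : Claim_equal_normalize_anchor_positions_py := by
  intro indices frame_count _
  unfold Spec_normalize_anchor_positions_py
  unfold normalize_anchor_positions_py normalize_anchor_positions_py_alt
  set n : Int := min (indices.length : Int) frame_count with hn
  by_cases hle : n ≤ 0
  · simp [hle]
  · simp only [if_neg hle]
    have hpos : 0 < n := lt_of_not_ge hle
    obtain ⟨m, hm⟩ : ∃ m : Nat, n = (m : Int) := ⟨n.toNat, (Int.toNat_of_nonneg hpos.le).symm⟩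
    rw [hm, PySem.List.pyRange_zero_natCast]
    have hvals : (List.map (fun (k : Nat) => (k : Int)) (List.range m)).map
        (fun pos => PySem.List.pyGetD indices pos 0) = pvVals indices m := by
      unfold pvVals
      rw [List.map_map]
      exact List.map_congr_left fun i _ => by
        simp only [Function.comp_apply, PySem.List.pyGetD_natCast]
    have hdict : (List.map (fun (k : Nat) => (k : Int)) (List.range m)).foldl
        (fun (d : PySem.Dict Int Int) pos => d.insert (PySem.List.pyGetD indices pos 0) pos)
        ⟨[]⟩ = pvDict indices m := by
      unfold pvDict
      rw [List.foldl_map]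
      simp only [PySem.List.pyGetD_natCast]
    rw [hvals, hdict, pvDict_keys]
    -- characterize B's backward scan
    have hscan : ((List.map (fun (k : Nat) => (k : Int)) (List.range m)).reverse).foldl
        (fun (s : PySem.Set Int × List (Int × Int)) pos =>
          let v := PySem.List.pyGetD (pvVals indices m) pos 0
          if s.1.contains v then s else (s.1.add v, s.2 ++ [(v, pos)]))
        (PySem.Set.empty, [])
        = (PySem.Set.ofList ((pvVals indices m).reverse),
           (PySem.Set.ofList ((pvVals indices m).reverse)).map
             (fun k => (k, (pvLast indices m k : Int)))) := by
      rw [← List.map_reverse, List.foldl_map]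
      simp only [PySem.List.pyGetD_natCast]
      have := pvScan_take indices m m le_rfl
      rw [List.take_of_length_le (by simp), List.take_of_length_le (by simp [pvVals_length])]
        at this
      exact this
    rw [hscan]
    -- B's sorted pair list is A's sorted key list mapped with the last-position tag
    set g : Int → Int × Int := fun k => (k, (pvLast indices m k : Int)) with hg
    set sk : List Int := PySem.List.sorted (PySem.Set.ofList (pvVals indices m)) (fun k => k)
      with hsk
    have hperm : (sk.map g).Perm ((PySem.Set.ofList ((pvVals indices m).reverse)).map g) := by
      refine List.Perm.map g ?_
      refine ((PySem.List.sorted_perm _ _ _).trans ?_)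
      rw [List.perm_ext_iff_of_nodup (PySem.Set.nodup_ofList _) (PySem.Set.nodup_ofList _)]
      intro a
      simp [PySem.Set.mem_ofList]
    have hnodup : sk.Nodup := by
      rw [List.Perm.nodup_iff (PySem.List.sorted_perm _ _ _)]
      exact PySem.Set.nodup_ofList _
    have hpw : List.Pairwise (fun a b : Int × Int => a.1 < b.1) (sk.map g) := by
      rw [List.pairwise_map]
      have h1 : List.Pairwise (fun a b : Int => a ≤ b) sk :=
        PySem.List.sorted_pairwise _ _
      exact (h1.and hnodup).imp (fun h => lt_of_le_of_ne h.1 h.2)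
    have hsorted : PySem.List.sorted
        ((PySem.Set.ofList ((pvVals indices m).reverse)).map g) (fun t => t.1)
        = sk.map g :=
      PySem.List.sorted_eq_of_perm_of_pairwise_lt _ _ _ hperm hpw
    rw [hsorted]
    refine Prod.ext ?_ ?_
    · simp only [List.map_map]
      exact ((List.map_congr_left fun k _ => rfl).trans (List.map_id _)).symm
    · simp only [List.map_map]
      refine List.map_congr_left (fun k hk => ?_)
      have hkset : k ∈ PySem.Set.ofList (pvVals indices m) :=
        (PySem.List.mem_sorted _ _ _ _).mp hk
      rw [pvDict_getD indices m hkset]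
      rfl
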